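-- pv_equiv track=rewrite | github.com/NickRou/AOC2023 | day1/Day1.py | get_last_digit
-- ===== SOURCE A (Python) =====
-- digits_dict = {
--     'one' : '1',
--     'two' : '2',
--     'three' : '3',
--     'four' : '4',
--     'five' : '5',
--     'six' : '6',
--     'seven' : '7',
--     'eight' : '8',
--     'nine' : '9',
-- }
--
-- def get_last_digit(line):
--     digit_str = ''
--     for i in range(len(line)-1, -1, -1):
--         if (line[i].isdigit()):
--             return line[i]
--         else:
--             digit_str = line[i] + digit_str
--             for digit in digits_dict:
--                 if digit in digit_str:
--                     return digits_dict[digit]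
--     return ''
-- ===== SOURCE B (Python) =====
-- WORDS = {
--     'one': '1', 'two': '2', 'three': '3', 'four': '4', 'five': '5',
--     'six': '6', 'seven': '7', 'eight': '8', 'nine': '9',
-- }
--
-- def get_last_digit(line):
--     # staged: remember the last digit character's position, then let each
--     # spelled-out word bid with its rightmost occurrence (str.rfind);
--     # the candidate at the highest position wins.
--     best_i, best_v = -1, ''
--     for i, c in enumerate(line):
--         if c.isdigit():
--             best_i, best_v = i, c
--     for w, d in WORDS.items():
--         j = line.rfind(w)
--         if j > best_i:
--             best_i, best_v = j, d
--     return best_v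
-- ===== Notes on version B (the rewrite author's own statement) =====
-- stated objective: faster
-- what changed: A scans right-to-left rebuilding a growing suffix string and substring-searching all nine digit words in it at every position; B instead runs two staged passes with no per-position inner loop: one fold recording the last digit character's position, then one rfind per spelled word, returning the candidate at the highest position.
import Mathlib
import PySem

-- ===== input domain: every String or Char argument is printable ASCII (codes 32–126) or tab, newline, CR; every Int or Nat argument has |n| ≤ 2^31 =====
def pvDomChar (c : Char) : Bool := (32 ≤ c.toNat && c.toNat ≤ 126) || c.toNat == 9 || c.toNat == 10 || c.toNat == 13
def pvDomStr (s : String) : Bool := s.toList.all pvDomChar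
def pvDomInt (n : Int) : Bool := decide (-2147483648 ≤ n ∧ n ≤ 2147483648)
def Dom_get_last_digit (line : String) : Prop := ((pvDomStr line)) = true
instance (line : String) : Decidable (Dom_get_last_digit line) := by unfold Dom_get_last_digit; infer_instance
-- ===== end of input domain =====

-- B replaces A's per-position growing-suffix substring searches with two staged passes:
-- a fold recording the last digit character's position, then one rfind per spelled word;
-- the candidate at the highest position wins (objective: faster).

-- ===== PORT A =====
-- digits_dict, iterated in insertion order with its values
def pvWordsA : List (List Char × String) :=
  [(['o','n','e'], "1"), (['t','w','o'], "2"), (['t','h','r','e','e'], "3"),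
   (['f','o','u','r'], "4"), (['f','i','v','e'], "5"), (['s','i','x'], "6"),
   (['s','e','v','e','n'], "7"), (['e','i','g','h','t'], "8"), (['n','i','n','e'], "9")]

-- inner loop: for digit in digits_dict: if digit in digit_str: return digits_dict[digit]
def pvFindA (acc : List Char) : List (List Char × String) → Option String
  | [] => none
  | (w, d) :: rest => if PySem.Chars.isIn w acc then some d else pvFindA acc rest

-- outer loop over i = len-1 .. 0; first arg is the not-yet-visited part reversed, second is digit_str
def pvLoopA : List Char → List Char → String
  | [], _ => ""
  | c :: rev, acc =>
    if PySem.Chars.isdigit c then String.ofList [c]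
    else
      match pvFindA (c :: acc) pvWordsA with
      | some d => d
      | none => pvLoopA rev (c :: acc)

def get_last_digit (line : String) : String := pvLoopA line.toList.reverse []

-- ===== PORT B =====
-- WORDS, iterated in insertion order
def pvWordsB : List (List Char × String) :=
  [(['o','n','e'], "1"), (['t','w','o'], "2"), (['t','h','r','e','e'], "3"),
   (['f','o','u','r'], "4"), (['f','i','v','e'], "5"), (['s','i','x'], "6"),
   (['s','e','v','e','n'], "7"), (['e','i','g','h','t'], "8"), (['n','i','n','e'], "9")]

-- first loop body: if c.isdigit(): best_i, best_v = i, c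
def pvStep1 (b : Int × String) (p : Int × Char) : Int × String :=
  if PySem.Chars.isdigit p.2 then (p.1, String.ofList [p.2]) else b

-- second loop body: j = line.rfind(w); if j > best_i: best_i, best_v = j, d
def pvStep2 (s : List Char) (b : Int × String) (wd : List Char × String) : Int × String :=
  let j := PySem.Chars.rfind s wd.1
  if b.1 < j then (j, wd.2) else b

def get_last_digit_alt (line : String) : String :=
  let s := line.toList
  (pvWordsB.foldl (pvStep2 s)
    ((PySem.List.enumerate s 0).foldl pvStep1 ((-1 : Int), ""))).2

-- ===== PRECONDITION & SPEC =====
def Spec_get_last_digit (line : String) (out : String) : Prop := out = get_last_digit_alt line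
instance (line : String) (out : String) : Decidable (Spec_get_last_digit line out) := by unfold Spec_get_last_digit; infer_instance

-- ===== CLAIM (what is proved, stated in full; the proofs are below) =====
def Claim_equal_get_last_digit : Prop := ∀ (line : String), Dom_get_last_digit line → Spec_get_last_digit line (get_last_digit line)

-- ===== LEMMAS AND PROOFS =====

-- ## proof-side reference scan: right-to-left, first digit char or word starting at the position

def pvFindB (s : List Char) : List (List Char × String) → Option String
  | [] => none
  | (w, d) :: rest => if PySem.Chars.startswith s w then some d else pvFindB s rest

def pvScan : List Char → String
  | [] => ""
  | c :: rest =>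
    let r := pvScan rest
    if r ≠ "" then r
    else if PySem.Chars.isdigit c then String.ofList [c]
    else
      match pvFindB (c :: rest) pvWordsB with
      | some d => d
      | none => ""

-- ## Part I: A's loop equals the reference scan

theorem pvFindA_eq_none_iff (acc : List Char) (ws : List (List Char × String)) :
    pvFindA acc ws = none ↔ ∀ wd ∈ ws, PySem.Chars.isIn wd.1 acc = false := by
  induction ws with
  | nil => simp [pvFindA]
  | cons wd rest ih =>
    obtain ⟨w, d⟩ := wd
    simp only [pvFindA, List.mem_cons]
    split <;> rename_i h
    · constructor
      · intro h'; cases h'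
      · intro h'; have := h' (w, d) (Or.inl rfl); simp at this; rw [this] at h; cases h
    · rw [ih]
      constructor
      · intro h' wd hwd
        rcases hwd with rfl | hwd
        · simpa using h
        · exact h' wd hwd
      · intro h' wd hwd; exact h' wd (Or.inr hwd)

theorem pvFindB_eq_some_mem (s : List Char) (ws : List (List Char × String)) (d : String)
    (h : pvFindB s ws = some d) : ∃ w, (w, d) ∈ ws := by
  induction ws with
  | nil => simp [pvFindB] at h
  | cons wd rest ih =>
    obtain ⟨w, d'⟩ := wd
    simp only [pvFindB] at h
    split at h
    · cases h; exact ⟨w, List.mem_cons_self⟩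
    · obtain ⟨w', hw'⟩ := ih h; exact ⟨w', List.mem_cons_of_mem _ hw'⟩

theorem pvFind_congr (acc : List Char) (ws : List (List Char × String))
    (h : ∀ wd ∈ ws, PySem.Chars.isIn wd.1 acc = PySem.Chars.startswith acc wd.1) :
    pvFindA acc ws = pvFindB acc ws := by
  induction ws with
  | nil => rfl
  | cons wd rest ih =>
    obtain ⟨w, d⟩ := wd
    have hw := h (w, d) (List.mem_cons_self)
    simp only [pvFindA, pvFindB, hw]
    split
    · rfl
    · exact ih (fun wd hwd => h wd (List.mem_cons_of_mem _ hwd))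

theorem pvWordsB_snd_ne_empty (w : List Char) (d : String) (h : (w, d) ∈ pvWordsB) : d ≠ "" := by
  fin_cases h <;> decide

theorem pvWordsB_fst_ne_nil (w : List Char) (d : String) (h : (w, d) ∈ pvWordsB) : w ≠ [] := by
  fin_cases h <;> decide

theorem pvOfList_cons_ne_empty (c : Char) (l : List Char) : String.ofList (c :: l) ≠ "" := by
  intro h; have := congrArg String.toList h; simp at this

theorem pvFindB_eq_none_iff (s : List Char) (ws : List (List Char × String)) :
    pvFindB s ws = none ↔ ∀ wd ∈ ws, PySem.Chars.startswith s wd.1 = false := by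
  induction ws with
  | nil => simp [pvFindB]
  | cons wd rest ih =>
    obtain ⟨w, d⟩ := wd
    simp only [pvFindB, List.mem_cons]
    split <;> rename_i h
    · constructor
      · intro h'; cases h'
      · intro h'; have := h' (w, d) (Or.inl rfl); simp at this; rw [this] at h; cases h
    · rw [ih]
      constructor
      · intro h' wd hwd
        rcases hwd with rfl | hwd
        · simpa using h
        · exact h' wd hwd
      · intro h' wd hwd; exact h' wd (Or.inr hwd)

theorem pvScan_quiet (s : List Char)
    (hd : ∀ c ∈ s, PySem.Chars.isdigit c = false)
    (hw : ∀ wd ∈ pvWordsB, PySem.Chars.isIn wd.1 s = false) :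
    pvScan s = "" := by
  induction s with
  | nil => rfl
  | cons c rest ih =>
    have hrest : pvScan rest = "" := by
      apply ih
      · intro x hx; exact hd x (List.mem_cons_of_mem _ hx)
      · intro wd hwd
        have := hw wd hwd
        rw [PySem.Chars.isIn_eq_false_iff] at this ⊢
        intro hinf; exact this (hinf.trans (List.suffix_cons c rest).isInfix)
    have hc : PySem.Chars.isdigit c = false := hd c List.mem_cons_self
    have hfind : pvFindB (c :: rest) pvWordsB = none := by
      rw [pvFindB_eq_none_iff]
      intro wd hwd
      have := hw wd hwd
      rw [PySem.Chars.isIn_eq_false_iff] at this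
      cases hcase : PySem.Chars.startswith (c :: rest) wd.1 with
      | false => rfl
      | true =>
        exfalso
        exact this ((PySem.Chars.startswith_iff _ _).mp hcase).isInfix
    simp [pvScan, hrest, hc, hfind]

theorem pvScan_append (x z : List Char) (h : pvScan z ≠ "") :
    pvScan (x ++ z) = pvScan z := by
  induction x with
  | nil => rfl
  | cons c x' ih =>
    simp only [List.cons_append, pvScan, ih]
    simp [h]

theorem pvLoop_invariant (q : List Char) : ∀ (s : List Char),
    (∀ c ∈ s, PySem.Chars.isdigit c = false) →
    (∀ wd ∈ pvWordsB, PySem.Chars.isIn wd.1 s = false) →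
    pvLoopA q s = pvScan (q.reverse ++ s) := by
  induction q with
  | nil =>
    intro s hd hw
    simp [pvLoopA, pvScan_quiet s hd hw]
  | cons c q' ih =>
    intro s hd hw
    have hquiet : pvScan s = "" := pvScan_quiet s hd hw
    have hrw : (c :: q').reverse ++ s = q'.reverse ++ (c :: s) := by simp
    rw [hrw]
    by_cases hc : PySem.Chars.isdigit c = true
    · have hcs : pvScan (c :: s) = String.ofList [c] := by
        simp [pvScan, hquiet, hc]
      rw [pvLoopA]
      rw [hc, if_pos rfl]
      rw [pvScan_append _ _ (by rw [hcs]; exact pvOfList_cons_ne_empty c []), hcs]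
    · have hc' : PySem.Chars.isdigit c = false := by
        cases h : PySem.Chars.isdigit c
        · rfl
        · exact absurd h hc
      have hcong : pvFindA (c :: s) pvWordsA = pvFindB (c :: s) pvWordsB := by
        rw [show pvWordsA = pvWordsB from rfl]
        apply pvFind_congr
        intro wd hwd
        have hns : ¬ wd.1 <:+: s := (PySem.Chars.isIn_eq_false_iff _ _).mp (hw wd hwd)
        cases hpre : PySem.Chars.startswith (c :: s) wd.1 with
        | true =>
          exact (PySem.Chars.isIn_iff_infix _ _).mpr
            ((PySem.Chars.startswith_iff _ _).mp hpre).isInfix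
        | false =>
          rw [PySem.Chars.isIn_eq_false_iff]
          intro hinf
          rcases List.infix_cons_iff.mp hinf with hp | hs
          · rw [(PySem.Chars.startswith_iff _ _).mpr hp] at hpre; cases hpre
          · exact hns hs
      rw [pvLoopA, if_neg (by rw [hc']; exact fun h => nomatch h)]
      cases hfind : pvFindA (c :: s) pvWordsA with
      | some d =>
        have hBfind : pvFindB (c :: s) pvWordsB = some d := by rw [← hcong, hfind]
        obtain ⟨w, hwmem⟩ := pvFindB_eq_some_mem _ _ _ hBfind
        have hdne : d ≠ "" := pvWordsB_snd_ne_empty w d hwmem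
        have hcs : pvScan (c :: s) = d := by
          simp [pvScan, hquiet, hc', hBfind]
        rw [pvScan_append _ _ (by rw [hcs]; exact hdne), hcs]
      | none =>
        apply ih (c :: s)
        · intro x hx
          rcases List.mem_cons.mp hx with rfl | hx
          · exact hc'
          · exact hd x hx
        · intro wd hwd
          exact (pvFindA_eq_none_iff _ _).mp hfind wd hwd

theorem pvA_eq_scan (line : String) : get_last_digit line = pvScan line.toList := by
  unfold get_last_digit
  have := pvLoop_invariant line.toList.reverse []
  simp only [List.reverse_reverse, List.append_nil] at this
  apply this (by simp)
  intro wd hwd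
  rw [PySem.Chars.isIn_eq_false_iff]
  intro hinf
  exact pvWordsB_fst_ne_nil wd.1 wd.2 hwd (List.eq_nil_of_infix_nil hinf)

-- ## Part II: B's staged passes equal the reference scan

-- last digit of s, as (index, char), right-to-left characterisation
def pvLdig : List Char → Option (Nat × Char)
  | [] => none
  | c :: r =>
    match pvLdig r with
    | some (i, d) => some (i + 1, d)
    | none => if PySem.Chars.isdigit c then some (0, c) else none

theorem pvLdig_none (s : List Char) (h : pvLdig s = none) :
    ∀ c ∈ s, PySem.Chars.isdigit c = false := by
  induction s with
  | nil => intro c hc; cases hc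
  | cons c0 r ih =>
    intro c hc
    simp only [pvLdig] at h
    rcases hl : pvLdig r with _ | ⟨i, d⟩
    · rw [hl] at h
      simp only at h
      split at h
      · cases h
      · rcases List.mem_cons.mp hc with rfl | hc'
        · rename_i hdig
          cases hcase : PySem.Chars.isdigit c
          · rfl
          · exact absurd hcase hdig
        · exact ih hl c hc'
    · rw [hl] at h; cases h

theorem pvLdig_some (s : List Char) (i : Nat) (d : Char) (h : pvLdig s = some (i, d)) :
    s[i]? = some d ∧ PySem.Chars.isdigit d = true ∧
      ∀ j c', i < j → s[j]? = some c' → PySem.Chars.isdigit c' = false := by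
  induction s generalizing i with
  | nil => cases h
  | cons c0 r ih =>
    simp only [pvLdig] at h
    rcases hl : pvLdig r with _ | ⟨i', d'⟩
    · rw [hl] at h
      simp only at h
      split at h
      · rename_i hdig
        cases h
        refine ⟨rfl, hdig, ?_⟩
        intro j c' hj hc'
        obtain ⟨j', rfl⟩ := Nat.exists_eq_add_of_lt hj
        simp only [Nat.zero_add, List.getElem?_cons_succ] at hc'
        exact pvLdig_none r hl c' (List.mem_of_getElem? hc')
      · cases h
    · rw [hl] at h
      simp only [Option.some.injEq, Prod.mk.injEq] at h
      obtain ⟨rfl, rfl⟩ := h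
      obtain ⟨h1, h2, h3⟩ := ih i' hl
      refine ⟨by simpa using h1, h2, ?_⟩
      intro j c' hj hc'
      obtain ⟨j', rfl⟩ := Nat.exists_eq_add_of_lt hj
      rw [show i' + 1 + j' + 1 = (i' + (j' + 1)) + 1 by omega] at hc'
      simp only [List.getElem?_cons_succ] at hc'
      exact h3 (i' + (j' + 1)) c' (by omega) hc' 

theorem pvLoop1_eq (s : List Char) : ∀ (k : Int) (acc : Int × String),
    (PySem.List.enumerate s k).foldl pvStep1 acc =
      match pvLdig s with
      | some (i, d) => (k + (i : Int), String.ofList [d])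
      | none => acc := by
  induction s with
  | nil => intro k acc; simp [pvLdig, PySem.List.enumerate_nil]
  | cons c r ih =>
    intro k acc
    rw [PySem.List.enumerate_cons, List.foldl_cons, ih]
    by_cases hc : PySem.Chars.isdigit c = true
    · simp only [pvStep1, hc, if_pos]
      rcases hl : pvLdig r with _ | ⟨i, d⟩
      · simp [pvLdig, hl, hc]
      · simp only [pvLdig, hl]
        simp only [Prod.mk.injEq]
        exact ⟨by push_cast; ring, trivial⟩
    · have hc' : PySem.Chars.isdigit c = false := by
        cases hcase : PySem.Chars.isdigit c
        · rfl
        · exact absurd hcase hc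
      simp only [pvStep1, hc', Bool.false_eq_true, if_false]
      rcases hl : pvLdig r with _ | ⟨i, d⟩
      · simp [pvLdig, hl, hc']
      · simp only [pvLdig, hl]
        simp only [Prod.mk.injEq]
        exact ⟨by push_cast; ring, trivial⟩

theorem pvRfindGo_spec (s sub : List Char) (j : Nat) :
    (PySem.Chars.rfind.go s sub j = -1 ∧ ∀ i ≤ j, ¬ sub <+: s.drop i) ∨
    (∃ k ≤ j, PySem.Chars.rfind.go s sub j = (k : Int) ∧ sub <+: s.drop k ∧
      ∀ i ≤ j, k < i → ¬ sub <+: s.drop i) := by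
  induction j with
  | zero =>
    by_cases h : sub.isPrefixOf s = true
    · right
      refine ⟨0, le_refl 0, ?_, ?_, ?_⟩
      · simp [PySem.Chars.rfind.go, h]
      · simpa using List.isPrefixOf_iff_prefix.mp h
      · intro i hi hi'; omega
    · left
      refine ⟨by simp [PySem.Chars.rfind.go, h], ?_⟩
      intro i hi
      interval_cases i
      simpa using fun hp => h (List.isPrefixOf_iff_prefix.mpr hp)
  | succ j ih =>
    by_cases h : sub.isPrefixOf (s.drop (j + 1)) = true
    · right
      refine ⟨j + 1, le_refl _, ?_, List.isPrefixOf_iff_prefix.mp h, ?_⟩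
      · simp [PySem.Chars.rfind.go, h]
      · intro i hi hi'; omega
    · have hnp : ¬ sub <+: s.drop (j + 1) := fun hp => h (List.isPrefixOf_iff_prefix.mpr hp)
      have hgo : PySem.Chars.rfind.go s sub (j + 1) = PySem.Chars.rfind.go s sub j := by
        simp [PySem.Chars.rfind.go, h]
      rcases ih with ⟨h1, h2⟩ | ⟨k, hk, h1, h2, h3⟩
      · left
        refine ⟨hgo.trans h1, ?_⟩
        intro i hi
        rcases Nat.lt_or_ge i (j + 1) with hlt | hge
        · exact h2 i (by omega)
        · have : i = j + 1 := by omega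
          subst this; exact hnp
      · right
        refine ⟨k, by omega, hgo.trans h1, h2, ?_⟩
        intro i hi hki
        rcases Nat.lt_or_ge i (j + 1) with hlt | hge
        · exact h3 i (by omega) hki
        · have : i = j + 1 := by omega
          subst this; exact hnp

theorem pvRfind_cases (s sub : List Char) :
    PySem.Chars.rfind s sub = -1 ∨ ∃ k : Nat, PySem.Chars.rfind s sub = (k : Int) := by
  rcases pvRfindGo_spec s sub s.length with ⟨h1, _⟩ | ⟨k, _, h1, _, _⟩
  · exact Or.inl h1
  · exact Or.inr ⟨k, h1⟩

theorem pvRfind_neg (s sub : List Char) (hsub : sub ≠ []) (h : PySem.Chars.rfind s sub = -1) :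
    ∀ i : Nat, ¬ sub <+: s.drop i := by
  intro i
  rcases Nat.lt_or_ge s.length i with hgt | hle
  · rw [List.drop_eq_nil_of_le (by omega)]
    intro hp
    exact hsub (List.prefix_nil.mp hp)
  · rcases pvRfindGo_spec s sub s.length with ⟨_, h2⟩ | ⟨k, _, h1, _, _⟩
    · exact h2 i hle
    · rw [PySem.Chars.rfind] at h; rw [h] at h1; omega

theorem pvRfind_nonneg (s sub : List Char) (hsub : sub ≠ []) (k : Nat)
    (h : PySem.Chars.rfind s sub = (k : Int)) :
    sub <+: s.drop k ∧ ∀ i : Nat, k < i → ¬ sub <+: s.drop i := by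
  rcases pvRfindGo_spec s sub s.length with ⟨h1, _⟩ | ⟨k', hk', h1, h2, h3⟩
  · rw [PySem.Chars.rfind] at h; rw [h] at h1; omega
  · rw [PySem.Chars.rfind] at h
    rw [h] at h1
    have hkk : k = k' := by omega
    subst hkk
    refine ⟨h2, ?_⟩
    intro i hi
    rcases Nat.lt_or_ge s.length i with hgt | hle
    · rw [List.drop_eq_nil_of_le (by omega)]
      intro hp
      exact hsub (List.prefix_nil.mp hp)
    · exact h3 i hle hi

theorem pvWords_not_prefix (wd wd' : List Char × String) (h : wd ∈ pvWordsB)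
    (h' : wd' ∈ pvWordsB) (hne : wd ≠ wd') : ¬ wd.1 <+: wd'.1 := by
  fin_cases h <;> fin_cases h' <;> revert hne <;> decide

theorem pvWordWordUnique (t : List Char) (wd wd' : List Char × String) (h : wd ∈ pvWordsB)
    (h' : wd' ∈ pvWordsB) (hne : wd ≠ wd') (hp : wd.1 <+: t) (hp' : wd'.1 <+: t) : False := by
  rcases List.prefix_or_prefix_of_prefix hp hp' with hpp | hpp
  · exact pvWords_not_prefix wd wd' h h' hne hpp
  · exact pvWords_not_prefix wd' wd h' h (Ne.symm hne) hpp

theorem pvFold2_id (s : List Char) (ws : List (List Char × String)) (b : Int × String)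
    (h : ∀ wd ∈ ws, PySem.Chars.rfind s wd.1 ≤ b.1) : ws.foldl (pvStep2 s) b = b := by
  induction ws with
  | nil => rfl
  | cons hd tl ih =>
    rw [List.foldl_cons]
    have hle := h hd List.mem_cons_self
    rw [show pvStep2 s b hd = b by simp only [pvStep2]; rw [if_neg (by omega)]]
    exact ih (fun wd hwd => h wd (List.mem_cons_of_mem _ hwd))

theorem pvFold2_win (s : List Char) (ws : List (List Char × String)) (b : Int × String)
    (wd : List Char × String) (hmem : wd ∈ ws) (hgt : b.1 < PySem.Chars.rfind s wd.1)
    (hmax : ∀ wd' ∈ ws, wd' ≠ wd → PySem.Chars.rfind s wd'.1 < PySem.Chars.rfind s wd.1) :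
    ws.foldl (pvStep2 s) b = (PySem.Chars.rfind s wd.1, wd.2) := by
  induction ws generalizing b with
  | nil => cases hmem
  | cons hd tl ih =>
    rw [List.foldl_cons]
    by_cases he : hd = wd
    · subst he
      rw [show pvStep2 s b hd = (PySem.Chars.rfind s hd.1, hd.2) by
        simp only [pvStep2]; rw [if_pos hgt]]
      apply pvFold2_id
      intro wd' hwd'
      by_cases he' : wd' = hd
      · subst he'; exact le_refl _
      · exact le_of_lt (hmax wd' (List.mem_cons_of_mem _ hwd') he')
    · have hmem' : wd ∈ tl := by
        rcases List.mem_cons.mp hmem with rfl | hm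
        · exact absurd rfl he
        · exact hm
      have hlt : PySem.Chars.rfind s hd.1 < PySem.Chars.rfind s wd.1 :=
        hmax hd List.mem_cons_self he
      have hstep : (pvStep2 s b hd).1 < PySem.Chars.rfind s wd.1 := by
        simp only [pvStep2]
        split
        · exact hlt
        · exact hgt
      exact ih (pvStep2 s b hd) hmem' hstep
        (fun wd' hwd' hne => hmax wd' (List.mem_cons_of_mem _ hwd') hne)

theorem pvFindB_first (t : List Char) (ws : List (List Char × String)) (wd : List Char × String)
    (hmem : wd ∈ ws) (hsw : PySem.Chars.startswith t wd.1 = true)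
    (huniq : ∀ wd' ∈ ws, wd' ≠ wd → PySem.Chars.startswith t wd'.1 = false) :
    pvFindB t ws = some wd.2 := by
  induction ws with
  | nil => cases hmem
  | cons hd tl ih =>
    obtain ⟨w0, d0⟩ := hd
    simp only [pvFindB]
    by_cases he : (w0, d0) = wd
    · subst he; rw [hsw]; simp
    · rw [huniq (w0, d0) List.mem_cons_self he]
      have hmem' : wd ∈ tl := by
        rcases List.mem_cons.mp hmem with h | h
        · exact absurd h.symm he
        · exact h
      exact ih hmem' (fun wd' hwd' hne => huniq wd' (List.mem_cons_of_mem _ hwd') hne)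

theorem pvScan_digit (s : List Char) : ∀ (i : Nat) (c : Char), s[i]? = some c →
    PySem.Chars.isdigit c = true →
    (∀ j c', i < j → s[j]? = some c' → PySem.Chars.isdigit c' = false) →
    (∀ wd ∈ pvWordsB, ∀ j : Nat, i < j → ¬ wd.1 <+: s.drop j) →
    pvScan s = String.ofList [c] := by
  induction s with
  | nil => intro i c hc; cases hc
  | cons c0 rest ih =>
    intro i c hc hdig habove hword
    match i with
    | 0 =>
      rw [List.getElem?_cons_zero] at hc
      cases hc
      have hquiet : pvScan rest = "" := by
        apply pvScan_quiet
        · intro x hx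
          obtain ⟨j, hj, rfl⟩ := List.getElem_of_mem hx
          exact habove (j + 1) _ (by omega) (by simp [hj])
        · intro wd hwd
          rw [PySem.Chars.isIn_eq_false_iff]
          intro hinf
          obtain ⟨j, hp⟩ := (PySem.Chars.exists_prefix_drop_iff_isIn _ _).mpr
            ((PySem.Chars.isIn_iff_infix _ _).mpr hinf)
          exact hword wd hwd (j + 1) (by omega) (by simpa using hp)
      simp [pvScan, hquiet, hdig]
    | i' + 1 =>
      rw [List.getElem?_cons_succ] at hc
      have hrest : pvScan rest = String.ofList [c] := by
        apply ih i' c hc hdig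
        · intro j c' hj hc'
          exact habove (j + 1) c' (by omega) (by simpa using hc')
        · intro wd hwd j hj
          have := hword wd hwd (j + 1) (by omega)
          simpa using this
      have hne : pvScan rest ≠ "" := by rw [hrest]; exact pvOfList_cons_ne_empty c []
      simp only [pvScan]
      rw [if_pos hne, hrest]

theorem pvScan_word (s : List Char) : ∀ (k : Nat) (wd : List Char × String), wd ∈ pvWordsB →
    wd.1 <+: s.drop k →
    (∀ j c', k ≤ j → s[j]? = some c' → PySem.Chars.isdigit c' = false) →
    (∀ wd' ∈ pvWordsB, ∀ j : Nat, k < j → ¬ wd'.1 <+: s.drop j) →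
    pvScan s = wd.2 := by
  induction s with
  | nil =>
    intro k wd hwd hp
    rw [List.drop_nil] at hp
    exact absurd (List.prefix_nil.mp hp) (pvWordsB_fst_ne_nil wd.1 wd.2 hwd)
  | cons c0 rest ih =>
    intro k wd hwd hp hnodig hnoword
    match k with
    | 0 =>
      rw [List.drop_zero] at hp
      have hquiet : pvScan rest = "" := by
        apply pvScan_quiet
        · intro x hx
          obtain ⟨j, hj, rfl⟩ := List.getElem_of_mem hx
          exact hnodig (j + 1) _ (by omega) (by simp [hj])
        · intro wd' hwd'
          rw [PySem.Chars.isIn_eq_false_iff]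
          intro hinf
          obtain ⟨j, hp'⟩ := (PySem.Chars.exists_prefix_drop_iff_isIn _ _).mpr
            ((PySem.Chars.isIn_iff_infix _ _).mpr hinf)
          exact hnoword wd' hwd' (j + 1) (by omega) (by simpa using hp')
      have hc0 : PySem.Chars.isdigit c0 = false :=
        hnodig 0 c0 (le_refl 0) (by simp)
      have hfind : pvFindB (c0 :: rest) pvWordsB = some wd.2 := by
        apply pvFindB_first _ _ wd hwd ((PySem.Chars.startswith_iff _ _).mpr hp)
        intro wd' hwd' hne
        cases hcase : PySem.Chars.startswith (c0 :: rest) wd'.1 with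
        | false => rfl
        | true =>
          exact absurd (pvWordWordUnique (c0 :: rest) wd' wd hwd' hwd hne
            ((PySem.Chars.startswith_iff _ _).mp hcase) hp) (fun h => h)
      simp [pvScan, hquiet, hc0, hfind]
    | k' + 1 =>
      rw [List.drop_succ_cons] at hp
      have hrest : pvScan rest = wd.2 := by
        apply ih k' wd hwd hp
        · intro j c' hj hc'
          exact hnodig (j + 1) c' (by omega) (by simpa using hc')
        · intro wd' hwd' j hj
          have := hnoword wd' hwd' (j + 1) (by omega)
          simpa using this
      have hne : pvScan rest ≠ "" := by
        rw [hrest]; exact pvWordsB_snd_ne_empty wd.1 wd.2 (by simpa using hwd)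
      simp only [pvScan]
      rw [if_pos hne, hrest]

theorem pvExistsMax (f : List Char × String → Int) (l : List (List Char × String))
    (hne : l ≠ []) : ∃ m ∈ l, ∀ a ∈ l, f a ≤ f m := by
  induction l with
  | nil => cases hne rfl
  | cons hd tl ih =>
    rcases tl with _ | ⟨hd', tl'⟩
    · refine ⟨hd, List.mem_cons_self, ?_⟩
      intro a ha
      rcases List.mem_cons.mp ha with rfl | h
      · exact le_refl _
      · cases h
    · obtain ⟨m, hm, hmax⟩ := ih (by simp)
      rcases le_or_gt (f hd) (f m) with hle | hgt
      · refine ⟨m, List.mem_cons_of_mem _ hm, ?_⟩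
        intro a ha
        rcases List.mem_cons.mp ha with rfl | h
        · exact hle
        · exact hmax a h
      · refine ⟨hd, List.mem_cons_self, ?_⟩
        intro a ha
        rcases List.mem_cons.mp ha with rfl | h
        · exact le_refl _
        · exact le_of_lt (lt_of_le_of_lt (hmax a h) hgt)

-- no occurrence of any word above position k, given each word's rfind is at most k
theorem pvNoWordAbove (s : List Char) (m : Int)
    (hall : ∀ wd ∈ pvWordsB, PySem.Chars.rfind s wd.1 ≤ m) :
    ∀ wd ∈ pvWordsB, ∀ j : Nat, m < (j : Int) → ¬ wd.1 <+: s.drop j := by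
  intro wd hwd j hj
  have hnil : wd.1 ≠ [] := pvWordsB_fst_ne_nil wd.1 wd.2 (by simpa using hwd)
  rcases pvRfind_cases s wd.1 with hneg | ⟨k', hk'⟩
  · exact pvRfind_neg s wd.1 hnil hneg j
  · have := hall wd hwd
    rw [hk'] at this
    exact (pvRfind_nonneg s wd.1 hnil k' hk').2 j (by omega)

theorem pvB_eq_scan (line : String) : get_last_digit_alt line = pvScan line.toList := by
  have hrfl : get_last_digit_alt line = (pvWordsB.foldl (pvStep2 line.toList)
      ((PySem.List.enumerate line.toList 0).foldl pvStep1 ((-1 : Int), ""))).2 := rfl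
  rw [hrfl, pvLoop1_eq]
  cases hld : pvLdig line.toList with
  | none =>
    have hnodig : ∀ c ∈ line.toList, PySem.Chars.isdigit c = false := pvLdig_none _ hld
    by_cases hall : ∀ wd ∈ pvWordsB, PySem.Chars.rfind line.toList wd.1 ≤ (-1 : Int)
    · rw [pvFold2_id _ _ _ hall]
      symm
      apply pvScan_quiet _ hnodig
      intro wd hwd
      cases hcase : PySem.Chars.isIn wd.1 line.toList with
      | false => rfl
      | true =>
        exfalso
        obtain ⟨j, hp⟩ := (PySem.Chars.exists_prefix_drop_iff_isIn _ _).mpr hcase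
        exact pvNoWordAbove line.toList (-1) hall wd hwd j (by omega) hp
    · push_neg at hall
      obtain ⟨wd1, hwd1, h1⟩ := hall
      obtain ⟨wd0, hmem0, hmax0⟩ :=
        pvExistsMax (fun wd => PySem.Chars.rfind line.toList wd.1) pvWordsB (by decide)
      · 
        have hnil0 : wd0.1 ≠ [] := pvWordsB_fst_ne_nil wd0.1 wd0.2 (by simpa using hmem0)
        have hgt0 : (-1 : Int) < PySem.Chars.rfind line.toList wd0.1 :=
          lt_of_lt_of_le h1 (hmax0 wd1 hwd1)
        rcases pvRfind_cases line.toList wd0.1 with hneg | ⟨k, hk⟩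
        · rw [hneg] at hgt0; omega
        · have hstrict : ∀ wd' ∈ pvWordsB, wd' ≠ wd0 →
              PySem.Chars.rfind line.toList wd'.1 < PySem.Chars.rfind line.toList wd0.1 := by
            intro wd' hwd' hne
            have hle := hmax0 wd' hwd'
            have hnil' : wd'.1 ≠ [] := pvWordsB_fst_ne_nil wd'.1 wd'.2 (by simpa using hwd')
            rcases pvRfind_cases line.toList wd'.1 with hneg' | ⟨k', hk'⟩
            · rw [hneg', hk]; omega
            · rcases lt_or_eq_of_le hle with hlt | heq
              · exact hlt
              · exfalso
                rw [hk', hk] at heq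
                have : k' = k := by omega
                subst this
                exact pvWordWordUnique (line.toList.drop k') wd' wd0 hwd' hmem0 hne
                  (pvRfind_nonneg _ _ hnil' k' hk').1
                  (pvRfind_nonneg _ _ hnil0 k' (by rw [hk])).1
          rw [pvFold2_win _ _ _ wd0 hmem0 hgt0 hstrict]
          symm
          apply pvScan_word line.toList k wd0 hmem0 (pvRfind_nonneg _ _ hnil0 k hk).1
          · intro j c' _ hc'
            exact hnodig c' (List.mem_of_getElem? hc')
          · intro wd' hwd' j hj
            have hle := hmax0 wd' hwd'
            rw [hk] at hle
            exact pvNoWordAbove line.toList (k : Int)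
              (fun wd h => by rw [← hk]; exact hmax0 wd h) wd' hwd' j (by omega)
  | some p =>
    obtain ⟨i, d⟩ := p
    obtain ⟨hci, hdig, habove⟩ := pvLdig_some _ i d hld
    show (pvWordsB.foldl (pvStep2 line.toList)
      ((0 : Int) + (i : Int), String.ofList [d])).2 = pvScan line.toList
    rw [zero_add]
    by_cases hall : ∀ wd ∈ pvWordsB, PySem.Chars.rfind line.toList wd.1 ≤ (i : Int)
    · rw [pvFold2_id _ _ _ hall]
      symm
      apply pvScan_digit line.toList i d hci hdig habove
      intro wd hwd j hj
      exact pvNoWordAbove line.toList (i : Int) hall wd hwd j (by omega)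
    · push_neg at hall
      obtain ⟨wd1, hwd1, h1⟩ := hall
      obtain ⟨wd0, hmem0, hmax0⟩ :=
        pvExistsMax (fun wd => PySem.Chars.rfind line.toList wd.1) pvWordsB (by decide)
      · 
        have hnil0 : wd0.1 ≠ [] := pvWordsB_fst_ne_nil wd0.1 wd0.2 (by simpa using hmem0)
        have hgt0 : (i : Int) < PySem.Chars.rfind line.toList wd0.1 :=
          lt_of_lt_of_le h1 (hmax0 wd1 hwd1)
        rcases pvRfind_cases line.toList wd0.1 with hneg | ⟨k, hk⟩
        · rw [hneg] at hgt0; omega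
        · have hstrict : ∀ wd' ∈ pvWordsB, wd' ≠ wd0 →
              PySem.Chars.rfind line.toList wd'.1 < PySem.Chars.rfind line.toList wd0.1 := by
            intro wd' hwd' hne
            have hle := hmax0 wd' hwd'
            have hnil' : wd'.1 ≠ [] := pvWordsB_fst_ne_nil wd'.1 wd'.2 (by simpa using hwd')
            rcases pvRfind_cases line.toList wd'.1 with hneg' | ⟨k', hk'⟩
            · rw [hneg', hk]; omega
            · rcases lt_or_eq_of_le hle with hlt | heq
              · exact hlt
              · exfalso
                rw [hk', hk] at heq
                have : k' = k := by omega
                subst this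
                exact pvWordWordUnique (line.toList.drop k') wd' wd0 hwd' hmem0 hne
                  (pvRfind_nonneg _ _ hnil' k' hk').1
                  (pvRfind_nonneg _ _ hnil0 k' (by rw [hk])).1
          rw [pvFold2_win _ _ _ wd0 hmem0 hgt0 hstrict]
          symm
          apply pvScan_word line.toList k wd0 hmem0 (pvRfind_nonneg _ _ hnil0 k hk).1
          · intro j c' hj hc'
            have hik : (i : Int) < (k : Int) := by rw [← hk]; exact hgt0
            exact habove j c' (by omega) hc'
          · intro wd' hwd' j hj
            exact pvNoWordAbove line.toList (k : Int)
              (fun wd h => by rw [← hk]; exact hmax0 wd h) wd' hwd' j (by omega)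

-- ===== VERDICT (by name: the statement is the Claim_ definition above) =====
theorem get_last_digit_spec : Claim_equal_get_last_digit := by
  intro line _
  unfold Spec_get_last_digit
  rw [pvA_eq_scan, pvB_eq_scan]
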